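-- pv_equiv track=rewrite | github.com/cry999/AtCoder | beginner/101/A.py | eating_symbols_easy
-- ===== SOURCE A (Python) =====
-- def eating_symbols_easy(S: str) -> int:
--     ans = 0
--     for symbol in S:
--         if symbol == '+':
--             ans += 1
--         else:
--             ans -= 1
--     return ans
-- ===== SOURCE B (Python) =====
-- def eating_symbols_easy(S: str) -> int:
--     # Divide and conquer: the net score of S[lo:hi] is the sum of the net
--     # scores of its two halves; a single character scores +1 for '+', else -1.
--     def net(lo: int, hi: int) -> int:
--         if hi - lo <= 0:
--             return 0
--         if hi - lo == 1:
--             return 1 if S[lo] == '+' else -1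
--         mid = (lo + hi) // 2
--         return net(lo, mid) + net(mid, hi)
--     return net(0, len(S))
-- ===== Notes on version B (the rewrite author's own statement) =====
-- stated objective: alternative
-- what changed: Replaced the linear accumulator loop with a divide-and-conquer recursion that splits the index range in half and sums the net scores of the two halves.
import Mathlib
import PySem

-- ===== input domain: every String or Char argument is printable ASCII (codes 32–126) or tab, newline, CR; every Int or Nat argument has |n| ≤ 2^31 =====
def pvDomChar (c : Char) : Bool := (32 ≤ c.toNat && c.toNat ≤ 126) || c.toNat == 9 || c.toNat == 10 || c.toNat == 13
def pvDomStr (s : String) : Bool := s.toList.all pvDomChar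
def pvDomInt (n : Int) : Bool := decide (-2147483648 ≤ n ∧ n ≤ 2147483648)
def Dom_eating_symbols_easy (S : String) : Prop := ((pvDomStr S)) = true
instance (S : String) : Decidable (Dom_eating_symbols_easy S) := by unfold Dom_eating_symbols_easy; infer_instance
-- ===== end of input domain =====

-- B replaces A's linear accumulator loop with a divide-and-conquer recursion over index halves (alternative decomposition, same cost).


-- ===== PORT A =====
def eating_symbols_easy (S : String) : Int :=
  S.toList.foldl (fun ans symbol => if symbol == '+' then ans + 1 else ans - 1) 0

-- ===== PORT B =====
-- net(lo, hi) of Source B; the fuel parameter (hi - lo suffices, each recursive call halves the range)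
-- is only a totality guard, and lo is always an in-range index so S[lo] is cs.getD lo ' ' (exact here).
def pvNet (cs : List Char) : Nat → Nat → Nat → Int
  | 0, _, _ => 0
  | fuel + 1, lo, hi =>
    if hi ≤ lo then 0
    else if hi - lo = 1 then (if cs.getD lo ' ' == '+' then 1 else -1)
    else pvNet cs fuel lo ((lo + hi) / 2) + pvNet cs fuel ((lo + hi) / 2) hi

def eating_symbols_easy_alt (S : String) : Int :=
  pvNet S.toList S.toList.length 0 S.toList.length

-- ===== PRECONDITION & SPEC =====
def Spec_eating_symbols_easy (S : String) (out : Int) : Prop := out = eating_symbols_easy_alt S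
instance (S : String) (out : Int) : Decidable (Spec_eating_symbols_easy S out) := by unfold Spec_eating_symbols_easy; infer_instance

-- ===== CLAIM (what is proved, stated in full; the proofs are below) =====
def Claim_equal_eating_symbols_easy : Prop := ∀ (S : String), Dom_eating_symbols_easy S → Spec_eating_symbols_easy S (eating_symbols_easy S)

-- ===== LEMMAS AND PROOFS =====

-- A's fold is translation-invariant in its accumulator.
theorem foldl_shift (l : List Char) (a : Int) :
    l.foldl (fun ans symbol => if symbol == '+' then ans + 1 else ans - 1) a
      = a + l.foldl (fun ans symbol => if symbol == '+' then ans + 1 else ans - 1) 0 := by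
  induction l generalizing a with
  | nil => simp
  | cons h t ih =>
    simp only [List.foldl_cons]
    rw [ih, ih (if h == '+' then (0:Int) + 1 else 0 - 1)]
    split_ifs <;> ring

-- B's recursion computes A's fold over the segment [lo, hi) of the character list.
theorem pvNet_eq_foldl (cs : List Char) : ∀ fuel lo hi, hi - lo ≤ fuel → hi ≤ cs.length →
    pvNet cs fuel lo hi
      = ((cs.drop lo).take (hi - lo)).foldl
          (fun ans symbol => if symbol == '+' then ans + 1 else ans - 1) 0 := by
  intro fuel
  induction fuel with
  | zero =>
    intro lo hi hf _
    have : hi - lo = 0 := by omega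
    simp [pvNet, this]
  | succ fuel ih =>
    intro lo hi hf hlen
    rw [pvNet]
    by_cases h0 : hi ≤ lo
    · rw [if_pos h0]
      have : hi - lo = 0 := by omega
      simp [this]
    · rw [if_neg h0]
      by_cases h1 : hi - lo = 1
      · rw [if_pos h1, h1]
        have hlo : lo < cs.length := by omega
        have hseg : (cs.drop lo).take 1 = [cs.getD lo ' '] := by
          rw [List.getD_eq_getElem _ _ hlo, List.drop_eq_getElem_cons hlo]
          rfl
        rw [hseg]
        simp only [List.foldl_cons, List.foldl_nil]
        split_ifs <;> simp
      · rw [if_neg h1]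
        set mid := (lo + hi) / 2 with hm
        rw [ih lo mid (by omega) (by omega), ih mid hi (by omega) hlen]
        have hsplit : (cs.drop lo).take (hi - lo)
            = (cs.drop lo).take (mid - lo) ++ (cs.drop mid).take (hi - mid) := by
          have h2 : hi - lo = (mid - lo) + (hi - mid) := by omega
          have h3 : List.drop (mid - lo) (List.drop lo cs) = List.drop mid cs := by
            rw [List.drop_drop]
            congr 1
            omega
          rw [h2, List.take_add, h3]
        rw [hsplit, List.foldl_append]
        conv_rhs => rw [foldl_shift]

-- ===== VERDICT (by name: the statement is the Claim_ definition above) =====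
theorem eating_symbols_easy_spec : Claim_equal_eating_symbols_easy := by
  intro S _
  unfold Spec_eating_symbols_easy eating_symbols_easy eating_symbols_easy_alt
  rw [pvNet_eq_foldl S.toList S.toList.length 0 S.toList.length (by omega) le_rfl,
    List.drop_zero, Nat.sub_zero, List.take_length]
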